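-- pv_equiv track=rewrite | github.com/jordanbangia/advent-of-code | 2023/14/main.py | count_rock_positions
-- ===== SOURCE A (Python) =====
-- def count_rock_positions(g: list[str]):
--     num_rows = len(g)
--     num_cols = len(g[0])
--
--     col_rock_pairs = []
--
--     for i in range(num_cols):
--         stopping_points = []
--
--         still_rock = num_rows+1
--         moving_rocks = 0
--         for k in range(num_rows):
--             if g[k][i] == "O":
--                 moving_rocks += 1
--             elif g[k][i] == ".":
--                 continue
--             elif g[k][i] == "#":
--                 if moving_rocks != 0:
--                     stopping_points.append(
--                         (still_rock, moving_rocks)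
--                     )
--                 moving_rocks = 0
--                 still_rock = num_rows - k
--         if moving_rocks != 0:
--             stopping_points.append(
--                 (still_rock, moving_rocks)
--             )
--         col_rock_pairs.append(stopping_points)
--
--
--     load = 0
--     for col_pairs in col_rock_pairs:
--         for still_rock, num_rocks in col_pairs:
--             p = [
--                 still_rock - r for r in range(1, num_rocks + 1)
--             ]
--             load += sum(p)
--
--     return load
-- ===== SOURCE B (Python) =====
-- def count_rock_positions(g: list[str]):
--     num_rows = len(g)
--     num_cols = len(g[0])
--     next_free = [0] * num_cols
--     load = 0
--     for r, row in enumerate(g):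
--         new_free = []
--         for ch, f in zip(row, next_free):
--             if ch == "O":
--                 load += num_rows - f
--                 new_free.append(f + 1)
--             elif ch == "#":
--                 new_free.append(r + 1)
--             else:
--                 new_free.append(f)
--         next_free = new_free
--     return load
-- ===== Notes on version B (the rewrite author's own statement) =====
-- stated objective: alternative
-- what changed: A scans the grid column by column collecting (stopping-point, rock-count) segment pairs and then sums an arithmetic series per segment; B makes a single row-major pass maintaining a next-free landing row per column and accumulates each rock's load directly.
import Mathlib
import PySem

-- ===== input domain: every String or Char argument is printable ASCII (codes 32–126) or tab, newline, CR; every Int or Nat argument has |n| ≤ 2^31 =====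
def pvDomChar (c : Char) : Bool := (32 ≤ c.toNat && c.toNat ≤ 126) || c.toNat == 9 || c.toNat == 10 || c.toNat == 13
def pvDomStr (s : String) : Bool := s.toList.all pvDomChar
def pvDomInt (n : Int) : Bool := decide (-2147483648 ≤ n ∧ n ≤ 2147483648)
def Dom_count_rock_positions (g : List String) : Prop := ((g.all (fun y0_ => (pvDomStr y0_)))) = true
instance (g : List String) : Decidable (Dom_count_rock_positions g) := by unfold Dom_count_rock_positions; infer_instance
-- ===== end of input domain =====

-- B replaces A's two-phase column-segment + arithmetic-series computation by a single row-major
-- pass that maintains, per column, the next free landing row; objective: alternative decomposition.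

-- ===== PORT A =====
def count_rock_positions (g : List String) : Int :=
  let num_rows : Int := g.length
  let num_cols : Int := PySem.Str.len ((PySem.List.pyGet? g 0).getD "")
  let col_rock_pairs : List (List (Int × Int)) :=
    (PySem.List.pyRange 0 num_cols 1).foldl
      (fun acc i =>
        let st := (PySem.List.pyRange 0 num_rows 1).foldl
          (fun (st : List (Int × Int) × Int × Int) k =>
            let ch := (PySem.Str.pyGet? ((PySem.List.pyGet? g k).getD "") i).getD ' '
            if ch = 'O' then (st.1, st.2.1, st.2.2 + 1)
            else if ch = '.' then st
            else if ch = '#' then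
              ((if st.2.2 ≠ 0 then st.1 ++ [(st.2.1, st.2.2)] else st.1), num_rows - k, 0)
            else st)
          ([], num_rows + 1, 0)
        acc ++ [if st.2.2 ≠ 0 then st.1 ++ [(st.2.1, st.2.2)] else st.1])
      []
  col_rock_pairs.foldl
    (fun load col_pairs =>
      col_pairs.foldl
        (fun load p =>
          load + ((PySem.List.pyRange 1 (p.2 + 1) 1).map (fun r => p.1 - r)).sum)
        load)
    0

-- ===== PORT B =====
-- inner loop of Source B: 'for ch, f in zip(row, next_free)' building new_free and adding loads
def rowPassB (nR : Int) (r : Int) : List Char → List Int → Int → List Int × Int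
  | c :: cs, f :: fs, load =>
      if c = 'O' then
        let p := rowPassB nR r cs fs (load + (nR - f))
        ((f + 1) :: p.1, p.2)
      else if c = '#' then
        let p := rowPassB nR r cs fs load
        ((r + 1) :: p.1, p.2)
      else
        let p := rowPassB nR r cs fs load
        (f :: p.1, p.2)
  | _, _, load => ([], load)

def count_rock_positions_alt (g : List String) : Int :=
  let num_rows : Int := g.length
  let num_cols : Int := PySem.Str.len ((PySem.List.pyGet? g 0).getD "")
  let st := (PySem.List.enumerate g 0).foldl
    (fun (st : List Int × Int) p => rowPassB num_rows p.1 p.2.toList st.1 st.2)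
    (List.replicate num_cols.toNat 0, 0)
  st.2

-- ===== PRECONDITION & SPEC =====
-- Pre_ excludes exactly the inputs where A raises IndexError: the empty grid (g[0]) and grids
-- with some row shorter than the first row (g[k][i]).
def Pre_count_rock_positions (g : List String) : Prop :=
  g ≠ [] ∧ ∀ s ∈ g, (g.headD "").toList.length ≤ s.toList.length
instance (g : List String) : Decidable (Pre_count_rock_positions g) := by
  unfold Pre_count_rock_positions; infer_instance

def pvWitness_count_rock_positions : List String := ["O.#", ".O.", "#OO"]

def Spec_count_rock_positions (g : List String) (out : Int) : Prop := out = count_rock_positions_alt g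
instance (g : List String) (out : Int) : Decidable (Spec_count_rock_positions g out) := by unfold Spec_count_rock_positions; infer_instance

-- ===== CLAIM (what is proved, stated in full; the proofs are below) =====
def Claim_equal_count_rock_positions : Prop := ∀ (g : List String), Dom_count_rock_positions g → Pre_count_rock_positions g → Spec_count_rock_positions g (count_rock_positions g)


-- ===== LEMMAS AND PROOFS =====

-- A-side abbreviations (proof-side only)
def segSum (s m : Int) : Int := ((PySem.List.pyRange 1 (m + 1) 1).map (fun r => s - r)).sum

def segTotal (l : List (Int × Int)) : Int := l.foldl (fun a p => a + segSum p.1 p.2) 0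

def finishLoad (st : List (Int × Int) × Int × Int) : Int :=
  segTotal (if st.2.2 ≠ 0 then st.1 ++ [(st.2.1, st.2.2)] else st.1)

def stepAu (nR : Int) (u : Int → Char) (st : List (Int × Int) × Int × Int) (k : Int) :
    List (Int × Int) × Int × Int :=
  let ch := u k
  if ch = 'O' then (st.1, st.2.1, st.2.2 + 1)
  else if ch = '.' then st
  else if ch = '#' then
    ((if st.2.2 ≠ 0 then st.1 ++ [(st.2.1, st.2.2)] else st.1), nR - k, 0)
  else st

-- one column processed top to bottom with a next-free counter (B's per-column effect)
def colRun (nR : Int) : List Char → Int → Int → Int × Int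
  | [], _, f => (f, 0)
  | c :: cs, k, f =>
      if c = 'O' then
        let p := colRun nR cs (k + 1) (f + 1)
        (p.1, (nR - f) + p.2)
      else if c = '#' then colRun nR cs (k + 1) (k + 1)
      else colRun nR cs (k + 1) f

-- B's whole fold over the rows, on char-list rows
def gridRun (nR : Int) : List (List Char) → Int → List Int × Int → List Int × Int
  | [], _, st => st
  | row :: rows, s, st => gridRun nR rows (s + 1) (rowPassB nR s row st.1 st.2)

-- sum of per-column loads, peeling columns off the front
def colsLoadN (nR : Int) : Nat → List (List Char) → Int → Int
  | 0, _, _ => 0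
  | n + 1, rows, s =>
      (colRun nR (rows.map (fun r => r.headD ' ')) s 0).2 +
        colsLoadN nR n (rows.map List.tail) s

theorem segSum_zero (s : Int) : segSum s 0 = 0 := by
  unfold segSum
  rw [PySem.List.pyRange_one_eq_nil (by omega)]
  simp

theorem segSum_succ (s m : Int) (hm : 0 ≤ m) :
    segSum s (m + 1) = segSum s m + (s - (m + 1)) := by
  unfold segSum
  rw [show m + 1 + 1 = (m + 1) + 1 from rfl,
    PySem.List.pyRange_one_succ_right (by omega : (1 : Int) ≤ m + 1)]
  simp

theorem foldl_add_shift {α : Type} (f : α → Int) (l : List α) (a : Int) :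
    l.foldl (fun x p => x + f p) a = a + l.foldl (fun x p => x + f p) 0 := by
  induction l generalizing a with
  | nil => simp
  | cons p l ih => simp only [List.foldl_cons]; rw [ih (a + f p), ih (0 + f p)]; ring

theorem segTotal_append_singleton (l : List (Int × Int)) (p : Int × Int) :
    segTotal (l ++ [p]) = segTotal l + segSum p.1 p.2 := by
  unfold segTotal
  rw [List.foldl_append, List.foldl_cons, List.foldl_nil, foldl_add_shift]

theorem finish_eq (stops : List (Int × Int)) (still moving : Int) :
    finishLoad (stops, still, moving) = segTotal stops + segSum still moving := by
  unfold finishLoad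
  by_cases h : moving = 0
  · simp [h, segSum_zero]
  · simp only [h, ne_eq, not_false_eq_true, if_true, if_pos]
    exact segTotal_append_singleton stops (still, moving)

theorem colA_gen (nR : Int) (u : Int → Char) (cs : List Char) :
    ∀ (k0 : Int) (stops : List (Int × Int)) (still moving : Int),
      0 ≤ moving →
      (∀ (j : Nat), (h : j < cs.length) → u (k0 + (j : Int)) = cs[j]) →
      finishLoad
        ((PySem.List.pyRange k0 (k0 + (cs.length : Int)) 1).foldl (stepAu nR u)
          (stops, still, moving)) =
        segTotal stops + segSum still moving +
          (colRun nR cs k0 (nR + 1 - still + moving)).2 := by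
  induction cs with
  | nil =>
      intro k0 stops still moving hm hu
      simp only [List.length_nil, Nat.cast_zero, add_zero]
      rw [PySem.List.pyRange_one_eq_nil (le_refl k0)]
      simp only [List.foldl_nil, colRun]
      rw [finish_eq]
      ring
  | cons c cs ih =>
      intro k0 stops still moving hm hu
      have hc : u k0 = c := by simpa using hu 0 (by simp)
      have hu' : ∀ (j : Nat), (h : j < cs.length) → u (k0 + 1 + (j : Int)) = cs[j] := by
        intro j h
        rw [show k0 + 1 + (j : Int) = k0 + ((j + 1 : Nat) : Int) by push_cast; ring]
        simpa using hu (j + 1) (by simpa using Nat.succ_lt_succ h)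
      rw [show k0 + (((c :: cs).length : Nat) : Int) = k0 + 1 + (cs.length : Int) by
        push_cast [List.length_cons]; ring]
      rw [PySem.List.pyRange_one_cons (by
        have : (0 : Int) ≤ (cs.length : Int) := Int.natCast_nonneg _
        omega)]
      simp only [List.foldl_cons]
      by_cases h1 : c = 'O'
      · have hstep : stepAu nR u (stops, still, moving) k0 = (stops, still, moving + 1) := by
          simp [stepAu, hc, h1]
        rw [hstep, ih (k0 + 1) stops still (moving + 1) (by omega) hu']
        simp only [colRun, h1, if_pos]
        try dsimp only
        rw [segSum_succ still moving hm,
          show nR + 1 - still + (moving + 1) = nR + 1 - still + moving + 1 by ring]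
        ring
      · by_cases h2 : c = '.'
        · have hstep : stepAu nR u (stops, still, moving) k0 = (stops, still, moving) := by
            simp [stepAu, hc, h1, h2]
          rw [hstep, ih (k0 + 1) stops still moving hm hu']
          simp only [colRun, if_neg h1,
            if_neg (show ¬ c = '#' by rw [h2]; decide)]
        · by_cases h3 : c = '#'
          · have hstep : stepAu nR u (stops, still, moving) k0 =
                ((if moving ≠ 0 then stops ++ [(still, moving)] else stops), nR - k0, 0) := by
              simp [stepAu, hc, h1, h2, h3]
            rw [hstep, ih (k0 + 1) _ (nR - k0) 0 (le_refl 0) hu']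
            simp only [colRun, if_neg h1, if_pos h3]
            rw [segSum_zero, show nR + 1 - (nR - k0) + 0 = k0 + 1 by ring]
            by_cases hmv : moving = 0
            · simp [hmv, segSum_zero]
            · rw [if_pos hmv, segTotal_append_singleton]
              ring
          · have hstep : stepAu nR u (stops, still, moving) k0 = (stops, still, moving) := by
              simp [stepAu, hc, h1, h2, h3]
            rw [hstep, ih (k0 + 1) stops still moving hm hu']
            simp only [colRun, if_neg h1, if_neg h3]

-- B-side lemmas
theorem rowPassB_shift (nR r : Int) (cs : List Char) :
    ∀ (fs : List Int) (load : Int),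
      rowPassB nR r cs fs load =
        ((rowPassB nR r cs fs 0).1, load + (rowPassB nR r cs fs 0).2) := by
  induction cs with
  | nil => intro fs load; simp [rowPassB]
  | cons c cs ih =>
      intro fs load
      cases fs with
      | nil => simp [rowPassB]
      | cons f fs =>
          by_cases h1 : c = 'O'
          · simp only [rowPassB, h1, if_pos]
            rw [ih fs (load + (nR - f)), ih fs (0 + (nR - f))]
            refine Prod.ext rfl ?_
            try dsimp only
            ring
          · by_cases h2 : c = '#' <;>
              simp only [rowPassB, h1, h2, if_neg, if_pos, ite_false, ite_true] <;>
              rw [ih fs load] <;> simp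

theorem gridRun_nilfs (nR : Int) (rows : List (List Char)) :
    ∀ (s : Int) (load : Int), gridRun nR rows s ([], load) = ([], load) := by
  induction rows with
  | nil => intro s load; rfl
  | cons row rows ih => intro s load; simp [gridRun, rowPassB, ih]

theorem gridRun_shift (nR : Int) (rows : List (List Char)) :
    ∀ (s : Int) (fs : List Int) (load : Int),
      gridRun nR rows s (fs, load) =
        ((gridRun nR rows s (fs, 0)).1, load + (gridRun nR rows s (fs, 0)).2) := by
  induction rows with
  | nil => intro s fs load; simp [gridRun]
  | cons row rows ih =>
      intro s fs load
      simp only [gridRun]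
      rw [rowPassB_shift nR s row fs load]
      rw [ih (s + 1) (rowPassB nR s row fs 0).1 (load + (rowPassB nR s row fs 0).2)]
      conv_rhs => rw [← Prod.mk.eta (p := rowPassB nR s row fs 0)]
      rw [ih (s + 1) (rowPassB nR s row fs 0).1 (rowPassB nR s row fs 0).2]
      refine Prod.ext rfl ?_
      dsimp only
      ring

theorem B_peel (nR : Int) (rows : List (List Char)) :
    ∀ (s : Int) (f : Int) (fs : List Int) (load : Int),
      (∀ row ∈ rows, row ≠ []) →
      (gridRun nR rows s (f :: fs, load)).2 =
        (colRun nR (rows.map (fun r => r.headD ' ')) s f).2 +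
          (gridRun nR (rows.map List.tail) s (fs, load)).2 := by
  induction rows with
  | nil => intro s f fs load _; simp [gridRun, colRun]
  | cons row rows ih =>
      intro s f fs load hne
      obtain ⟨c, cs, rfl⟩ : ∃ c cs, row = c :: cs := by
        cases row with
        | nil => exact absurd rfl (hne [] (by simp))
        | cons c cs => exact ⟨c, cs, rfl⟩
      have hne' : ∀ r ∈ rows, r ≠ [] := fun r hr => hne r (by simp [hr])
      simp only [List.map_cons, List.headD_cons, List.tail_cons, gridRun]
      by_cases h1 : c = 'O'
      · simp only [rowPassB, colRun, h1, if_pos]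
        rw [rowPassB_shift nR s cs fs (load + (nR - f))]
        try dsimp only
        rw [gridRun_shift nR rows (s + 1) ((f + 1) :: (rowPassB nR s cs fs 0).1)
              (load + (nR - f) + (rowPassB nR s cs fs 0).2)]
        try dsimp only
        rw [ih (s + 1) (f + 1) (rowPassB nR s cs fs 0).1 0 hne']
        rw [rowPassB_shift nR s cs fs load]
        try dsimp only
        rw [gridRun_shift nR (rows.map List.tail) (s + 1) (rowPassB nR s cs fs 0).1
              (load + (rowPassB nR s cs fs 0).2)]
        try dsimp only
        ring
      · by_cases h2 : c = '#'
        · simp only [rowPassB, colRun, h2,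
            if_neg (by decide : ¬('#' : Char) = 'O'), eq_self_iff_true, if_true]
          rw [rowPassB_shift nR s cs fs load]
          try dsimp only
          rw [gridRun_shift nR rows (s + 1) ((s + 1) :: (rowPassB nR s cs fs 0).1)
                (load + (rowPassB nR s cs fs 0).2)]
          try dsimp only
          rw [ih (s + 1) (s + 1) (rowPassB nR s cs fs 0).1 0 hne']
          rw [gridRun_shift nR (rows.map List.tail) (s + 1) (rowPassB nR s cs fs 0).1
                (load + (rowPassB nR s cs fs 0).2)]
          try dsimp only
          ring
        · simp only [rowPassB, colRun, if_neg h1, if_neg h2]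
          rw [rowPassB_shift nR s cs fs load]
          try dsimp only
          rw [gridRun_shift nR rows (s + 1) (f :: (rowPassB nR s cs fs 0).1)
                (load + (rowPassB nR s cs fs 0).2)]
          try dsimp only
          rw [ih (s + 1) f (rowPassB nR s cs fs 0).1 0 hne']
          rw [gridRun_shift nR (rows.map List.tail) (s + 1) (rowPassB nR s cs fs 0).1
                (load + (rowPassB nR s cs fs 0).2)]
          try dsimp only
          ring


theorem B_cols (nR : Int) (n : Nat) :
    ∀ (rows : List (List Char)) (s : Int) (load : Int),
      (∀ row ∈ rows, n ≤ row.length) →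
      (gridRun nR rows s (List.replicate n 0, load)).2 = load + colsLoadN nR n rows s := by
  induction n with
  | zero =>
      intro rows s load _
      simp [List.replicate, gridRun_nilfs, colsLoadN]
  | succ n ih =>
      intro rows s load h
      have hne : ∀ row ∈ rows, row ≠ [] := by
        intro row hr hnil
        have := h row hr
        simp [hnil] at this
      rw [List.replicate_succ,
        B_peel nR rows s 0 (List.replicate n 0) load hne,
        ih (rows.map List.tail) s load (by
          intro row hr
          obtain ⟨r, hr0, rfl⟩ := List.mem_map.mp hr
          have := h r hr0
          simp [List.length_tail]
          omega)]
      simp only [colsLoadN]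
      ring

theorem getD_tail {α : Type} (r : List α) (j : Nat) (d : α) :
    r.tail.getD j d = r.getD (j + 1) d := by
  cases r <;> simp [List.getD]

theorem headD_eq_getD {α : Type} (r : List α) (d : α) : r.headD d = r.getD 0 d := by
  cases r <;> simp [List.getD]

theorem colsLoadN_eq (nR : Int) (n : Nat) :
    ∀ (rows : List (List Char)) (s : Int),
      colsLoadN nR n rows s =
        ((List.range n).map
          (fun j => (colRun nR (rows.map (fun r => r.getD j ' ')) s 0).2)).sum := by
  induction n with
  | zero => intro rows s; simp [colsLoadN]
  | succ n ih =>
      intro rows s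
      simp only [colsLoadN, ih (rows.map List.tail) s]
      rw [List.range_succ_eq_map]
      simp only [List.map_cons, List.sum_cons, List.map_map]
      congr 1
      · rw [show (fun r : List Char => r.headD ' ') = (fun r : List Char => r.getD 0 ' ')
          from funext (fun r => headD_eq_getD r ' ')]
      · congr 1
        apply List.map_congr_left
        intro j _
        have hmap : List.map ((fun r : List Char => r.getD j ' ') ∘ List.tail) rows
            = List.map (fun r : List Char => r.getD (j + 1) ' ') rows :=
          List.map_congr_left (fun r _ => getD_tail r j ' ')
        rw [hmap]
        rfl

theorem fold_enum_toList (nR : Int) (g : List String) :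
    ∀ (s : Int) (st : List Int × Int),
      (PySem.List.enumerate g s).foldl
        (fun (st : List Int × Int) p => rowPassB nR p.1 p.2.toList st.1 st.2) st =
        gridRun nR (g.map String.toList) s st := by
  induction g with
  | nil => intro s st; simp [PySem.List.enumerate_nil, gridRun]
  | cons r g ih =>
      intro s st
      rw [PySem.List.enumerate_cons]
      simp only [List.foldl_cons, List.map_cons, gridRun]
      exact ih (s + 1) _

theorem loadfold (ls : List (List (Int × Int))) (acc : Int) :
    ls.foldl (fun load col_pairs => col_pairs.foldl
      (fun load p => load + ((PySem.List.pyRange 1 (p.2 + 1) 1).map (fun r => p.1 - r)).sum) load)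
      acc = acc + (ls.map segTotal).sum := by
  induction ls generalizing acc with
  | nil => simp
  | cons cp ls ih =>
      simp only [List.foldl_cons, List.map_cons, List.sum_cons]
      rw [ih]
      have h2 : cp.foldl (fun load p =>
          load + ((PySem.List.pyRange 1 (p.2 + 1) 1).map (fun r => p.1 - r)).sum) acc
          = acc + segTotal cp := foldl_add_shift (fun p : Int × Int => segSum p.1 p.2) cp acc
      rw [h2]
      ring

theorem A_eq (g : List String) (hne : g ≠ [])
    (hlen : ∀ s ∈ g, (g.headD "").toList.length ≤ s.toList.length) :
    count_rock_positions g =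
      ((List.range (g.headD "").toList.length).map
        (fun k => (colRun (g.length : Int)
          ((g.map String.toList).map (fun r => r.getD k ' ')) 0 0).2)).sum := by
  obtain ⟨a, t, rfl⟩ : ∃ a t, g = a :: t := by
    cases g with
    | nil => exact absurd rfl hne
    | cons a t => exact ⟨a, t, rfl⟩
  simp only [count_rock_positions, PySem.List.pyGet?_zero_cons, Option.getD_some,
    PySem.Str.len_eq]
  rw [PySem.List.foldl_append_singleton_eq_map, List.nil_append, loadfold, List.map_map,
    zero_add, PySem.List.pyRange_one 0 (a.toList.length : Int), List.map_map]
  simp only [sub_zero, Int.toNat_natCast, List.headD_cons]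
  congr 1
  apply List.map_congr_left
  intro k hk
  have hk' : k < a.toList.length := List.mem_range.mp hk
  have hu : ∀ (j : Nat), (h : j < ((((a :: t).map String.toList).map
        (fun r => r.getD k ' ')).length)) →
      (fun kk => (PySem.Str.pyGet? ((PySem.List.pyGet? (a :: t) kk).getD "")
        ((0 : Int) + (k : Int))).getD ' ') ((0 : Int) + (j : Int)) =
      (((a :: t).map String.toList).map (fun r => r.getD k ' '))[j] := by
    intro j hj
    have hjlen : j < (a :: t).length := by simpa using hj
    have hklen : k < ((a :: t)[j]).toList.length := by
      have := hlen ((a :: t)[j]) (List.getElem_mem hjlen)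
      simp only [List.headD_cons] at this
      omega
    simp only [zero_add, PySem.List.pyGet?_natCast, List.getElem?_eq_getElem hjlen,
      Option.getD_some, PySem.Str.pyGet?_natCast, List.getElem?_eq_getElem hklen,
      List.getElem_map, List.getD_eq_getElem _ _ hklen]
  have hcol := colA_gen ((a :: t).length : Int)
    (fun kk => (PySem.Str.pyGet? ((PySem.List.pyGet? (a :: t) kk).getD "")
      ((0 : Int) + (k : Int))).getD ' ')
    (((a :: t).map String.toList).map (fun r => r.getD k ' '))
    0 [] (((a :: t).length : Int) + 1) 0 (le_refl 0) hu
  rw [show ((0 : Int) + ((((a :: t).map String.toList).map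
      (fun r => r.getD k ' ')).length : Int)) = (((a :: t).length : Nat) : Int) by
    simp] at hcol
  refine Eq.trans hcol ?_
  rw [show (((a :: t).length : Int) + 1 - (((a :: t).length : Int) + 1) + 0 : Int) = 0 by ring,
    segSum_zero, show segTotal ([] : List (Int × Int)) = 0 from rfl]
  ring

theorem B_eq (g : List String) (hne : g ≠ [])
    (hlen : ∀ s ∈ g, (g.headD "").toList.length ≤ s.toList.length) :
    count_rock_positions_alt g =
      ((List.range (g.headD "").toList.length).map
        (fun k => (colRun (g.length : Int)
          ((g.map String.toList).map (fun r => r.getD k ' ')) 0 0).2)).sum := by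
  obtain ⟨a, t, rfl⟩ : ∃ a t, g = a :: t := by
    cases g with
    | nil => exact absurd rfl hne
    | cons a t => exact ⟨a, t, rfl⟩
  simp only [count_rock_positions_alt, PySem.List.pyGet?_zero_cons, Option.getD_some,
    PySem.Str.len_eq, Int.toNat_natCast]
  rw [fold_enum_toList]
  rw [B_cols ((a :: t).length : Int) a.toList.length ((a :: t).map String.toList) 0 0 (by
    intro row hr
    obtain ⟨r, hr0, rfl⟩ := List.mem_map.mp hr
    have := hlen r hr0
    simpa using this)]
  rw [colsLoadN_eq, zero_add]
  simp only [List.headD_cons]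

-- ===== VERDICT (by name: the statement is the Claim_ definition above) =====
theorem count_rock_positions_spec : Claim_equal_count_rock_positions := by
  intro g _ hpre
  unfold Spec_count_rock_positions
  rw [A_eq g hpre.1 hpre.2, B_eq g hpre.1 hpre.2]
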